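-- pv_equiv track=rewrite | github.com/cconnett/nonograms | iterative.py | Legals
-- ===== SOURCE A (Python) =====
-- def Legals(clues, offset, length):
--   minimum = sum(clues) + len(clues) - 1
--   if length - offset < minimum:
--     return
--   if not clues:
--     yield ()
--     return
--   for i in range(offset, length):
--     for element in Legals(clues[1:], i + clues[0] + 1, length):
--       yield (i,) + element
-- ===== SOURCE B (Python) =====
-- def Legals(clues, offset, length):
--   minimum = sum(clues) + len(clues) - 1
--   if length - offset < minimum:
--     return
--   if not clues:
--     yield ()
--     return
--   n = len(clues)
--   # tight upper bound for each block's start position, computed right-to-left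
--   hi = [0] * n
--   hi[n - 1] = min(length - 1, length - clues[n - 1])
--   for j in range(n - 2, -1, -1):
--     hi[j] = min(length - 1, hi[j + 1] - clues[j] - 1)
--   # breadth-first: extend every partial placement one block at a time
--   placements = [(i,) for i in range(offset, hi[0] + 1)]
--   for j in range(1, n):
--     placements = [p + (i,)
--                   for p in placements
--                   for i in range(p[-1] + clues[j - 1] + 1, hi[j] + 1)]
--   yield from placements
-- ===== Notes on version B (the rewrite author's own statement) =====
-- stated objective: alternative
-- what changed: Replaces the recursive depth-first generator (which re-checks a sum guard at every recursion level) by a non-recursive breadth-first construction: a backward pass precomputes a tight upper bound hi[j] for each block's start, then partial placements are extended block by block with comprehensions, so no infeasible branch is ever entered and there is no recursion.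
import Mathlib
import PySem

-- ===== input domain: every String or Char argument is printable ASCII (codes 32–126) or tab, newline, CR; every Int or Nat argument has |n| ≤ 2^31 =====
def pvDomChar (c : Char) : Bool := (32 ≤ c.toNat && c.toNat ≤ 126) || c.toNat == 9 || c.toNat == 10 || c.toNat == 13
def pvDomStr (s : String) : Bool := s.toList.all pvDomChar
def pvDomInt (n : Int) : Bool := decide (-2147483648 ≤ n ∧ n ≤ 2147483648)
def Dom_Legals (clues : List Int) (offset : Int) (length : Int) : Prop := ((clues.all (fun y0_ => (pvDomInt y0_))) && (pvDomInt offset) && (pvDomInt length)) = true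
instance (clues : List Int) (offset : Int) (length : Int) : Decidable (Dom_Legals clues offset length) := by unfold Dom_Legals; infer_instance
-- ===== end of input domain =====

-- B replaces A's recursive depth-first enumeration by a backward pass of tight start bounds
-- followed by a breadth-first, comprehension-based extension of partial placements (objective: alternative).
-- Both are compared on their list of yielded tuples (generators; no argument is mutated).

-- ===== PORT A =====
def Legals (clues : List Int) (offset : Int) (length : Int) : List (List Int) :=
  -- minimum = sum(clues) + len(clues) - 1
  if length - offset < clues.sum + (clues.length : Int) - 1 then []
  else
    match clues with
    | [] => [[]]
    | c :: rest =>
        (PySem.List.pyRange offset length 1).flatMap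
          (fun i => (Legals rest (i + c + 1) length).map (fun e => i :: e))

-- ===== PORT B =====
-- Source B's backward loop filling hi[n-1], hi[n-2], …, hi[0] (right-to-left = recursion on the list)
def hiList (clues : List Int) (length : Int) : List Int :=
  match clues with
  | [] => []
  | c :: rest =>
      match hiList rest length with
      | [] => [min (length - 1) (length - c)]
      | h :: t => min (length - 1) (h - c - 1) :: h :: t

def Legals_alt (clues : List Int) (offset : Int) (length : Int) : List (List Int) :=
  if length - offset < clues.sum + (clues.length : Int) - 1 then []
  else
    match clues with
    | [] => [[]]
    | c :: rest =>
        let hi := hiList (c :: rest) length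
        -- placements = [(i,) for i in range(offset, hi[0] + 1)]
        let init := (PySem.List.pyRange offset (hi.headD 0 + 1) 1).map (fun i => [i])
        -- for j in range(1, n): placements = [p + (i,) for p in placements for i in range(p[-1] + clues[j-1] + 1, hi[j] + 1)]
        ((c :: rest).zip hi.tail).foldl
          (fun acc gh =>
            acc.flatMap (fun p =>
              (PySem.List.pyRange (p.getLastD 0 + gh.1 + 1) (gh.2 + 1) 1).map
                (fun i => p ++ [i])))
          init

-- ===== PRECONDITION & SPEC =====
def Spec_Legals (clues : List Int) (offset : Int) (length : Int) (out : List (List Int)) : Prop := out = Legals_alt clues offset length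
instance (clues : List Int) (offset : Int) (length : Int) (out : List (List Int)) : Decidable (Spec_Legals clues offset length out) := by unfold Spec_Legals; infer_instance

-- ===== CLAIM (what is proved, stated in full; the proofs are below) =====
def Claim_equal_Legals : Prop := ∀ (clues : List Int) (offset : Int) (length : Int), Dom_Legals clues offset length → Spec_Legals clues offset length (Legals clues offset length)

-- ===== LEMMAS AND PROOFS =====

-- head of hiList (c :: rest)
def hiHead (c : Int) (rest : List Int) (length : Int) : Int :=
  match hiList rest length with
  | [] => min (length - 1) (length - c)
  | h :: _ => min (length - 1) (h - c - 1)

theorem hiList_cons (c : Int) (rest : List Int) (l : Int) :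
    hiList (c :: rest) l = hiHead c rest l :: hiList rest l := by
  have hstep : hiList (c :: rest) l =
      match hiList rest l with
      | [] => [min (l - 1) (l - c)]
      | h :: t => min (l - 1) (h - c - 1) :: h :: t := rfl
  rw [hstep]
  unfold hiHead
  cases hiList rest l <;> rfl

theorem hiHead_nil (c l : Int) : hiHead c [] l = min (l - 1) (l - c) := rfl

theorem hiHead_cons (c c1 : Int) (rest1 : List Int) (l : Int) :
    hiHead c (c1 :: rest1) l = min (l - 1) (hiHead c1 rest1 l - c - 1) := by
  unfold hiHead
  rw [hiList_cons]
  rfl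

theorem hiHead_le_len (c : Int) (rest : List Int) (l : Int) : hiHead c rest l ≤ l - 1 := by
  unfold hiHead; cases hiList rest l <;> simp

theorem hiHead_le (c : Int) (rest : List Int) (l : Int) :
    hiHead c rest l ≤ l - (c + rest.sum + (rest.length : Int)) := by
  induction rest generalizing c with
  | nil => rw [hiHead_nil]; simp
  | cons c1 rest1 ih =>
      have h1 := ih c1
      rw [hiHead_cons]
      simp only [List.sum_cons, List.length_cons]
      push_cast
      omega

-- depth-first form of B's enumeration, with the tight caps
def S : List Int → Int → Int → List (List Int)
  | [], _, _ => [[]]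
  | c :: rest, o, l =>
      (PySem.List.pyRange o (hiHead c rest l + 1) 1).flatMap
        (fun i => (S rest (i + c + 1) l).map (fun e => i :: e))

-- B's fold, in chained depth-first form
def T : List (Int × Int) → Int → List (List Int)
  | [], _ => [[]]
  | (g, h) :: gs, prev =>
      (PySem.List.pyRange (prev + g + 1) (h + 1) 1).flatMap
        (fun i => (T gs i).map (fun e => i :: e))

theorem T_nil (prev : Int) : T [] prev = [[]] := rfl

theorem T_cons (g h : Int) (gs : List (Int × Int)) (prev : Int) :
    T ((g, h) :: gs) prev =
      (PySem.List.pyRange (prev + g + 1) (h + 1) 1).flatMap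
        (fun i => (T gs i).map (fun e => i :: e)) := rfl

theorem S_eq_nil_of_gt (c : Int) (rest : List Int) (o l : Int) (h : hiHead c rest l < o) :
    S (c :: rest) o l = [] := by
  unfold S
  rw [PySem.List.pyRange_one_eq_nil (by omega)]
  simp

theorem S_eq_nil_of_guard (c : Int) (rest : List Int) (o l : Int)
    (hg : l - o < (c :: rest).sum + ((c :: rest).length : Int) - 1) :
    S (c :: rest) o l = [] := by
  apply S_eq_nil_of_gt
  have := hiHead_le c rest l
  simp only [List.sum_cons, List.length_cons] at hg
  push_cast at hg
  omega

theorem T_eq_S (rest : List Int) (c prev l : Int) :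
    T ((c :: rest).zip (hiList rest l)) prev = S rest (prev + c + 1) l := by
  induction rest generalizing c prev with
  | nil => rfl
  | cons c1 rest1 ih =>
      rw [hiList_cons]
      show T ((c, hiHead c1 rest1 l) :: (c1 :: rest1).zip (hiList rest1 l)) prev = _
      rw [T_cons]
      unfold S
      exact List.flatMap_congr (fun i _ => by rw [ih])

theorem foldl_ext (gs : List (Int × Int)) (init : List (List Int)) :
    gs.foldl
      (fun acc gh =>
        acc.flatMap (fun p =>
          (PySem.List.pyRange (p.getLastD 0 + gh.1 + 1) (gh.2 + 1) 1).map
            (fun i => p ++ [i]))) init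
      = init.flatMap (fun p => (T gs (p.getLastD 0)).map (fun e => p ++ e)) := by
  induction gs generalizing init with
  | nil => simp [T_nil]
  | cons gh gs ih =>
      obtain ⟨g, h⟩ := gh
      rw [List.foldl_cons, ih]
      rw [List.flatMap_assoc]
      apply List.flatMap_congr
      intro p _
      rw [T_cons, List.map_flatMap, List.flatMap_map]
      apply List.flatMap_congr
      intro i _
      simp only [List.getLastD_eq_getLast?, List.getLast?_concat, Option.getD_some, List.map_map]
      apply List.map_congr_left
      intro e _
      simp

theorem Legals_alt_eq (clues : List Int) (o l : Int) :
    Legals_alt clues o l =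
      if l - o < clues.sum + (clues.length : Int) - 1 then []
      else match clues with
        | [] => [[]]
        | c :: rest => S (c :: rest) o l := by
  unfold Legals_alt
  cases clues with
  | nil => rfl
  | cons c rest =>
      split_ifs with hg
      · rfl
      · simp only [hiList_cons, List.headD_cons, List.tail_cons]
        rw [foldl_ext]
        conv_rhs => rw [S]
        rw [List.flatMap_map]
        apply List.flatMap_congr
        intro i _
        rw [show ([i] : List Int).getLastD 0 = i from rfl, T_eq_S]
        simp

theorem Legals_cons (c : Int) (rest : List Int) (o l : Int) :
    Legals (c :: rest) o l =
      if l - o < (c :: rest).sum + ((c :: rest).length : Int) - 1 then []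
      else (PySem.List.pyRange o l 1).flatMap
            (fun i => (Legals rest (i + c + 1) l).map (fun e => i :: e)) := by
  rw [Legals]

theorem Legals_nil (o l : Int) :
    Legals [] o l = if l - o < -1 then [] else [[]] := by
  rw [Legals]
  norm_num

-- one cons-level of the A = S argument, from the two facts about the tail
theorem cons_step (c : Int) (rest : List Int) (l : Int)
    (ha : ∀ i, i ≤ hiHead c rest l → Legals rest (i + c + 1) l = S rest (i + c + 1) l)
    (hb : ∀ i, hiHead c rest l < i → i < l → Legals rest (i + c + 1) l = []) :
    ∀ o, Legals (c :: rest) o l = S (c :: rest) o l := by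
  intro o
  rw [Legals_cons]
  split_ifs with hg
  · exact (S_eq_nil_of_guard c rest o l hg).symm
  · conv_rhs => rw [S]
    have hlen := hiHead_le_len c rest l
    by_cases hol : o ≤ hiHead c rest l + 1
    · rw [PySem.List.pyRange_one_append o (hiHead c rest l + 1) l hol (by omega),
        List.flatMap_append]
      have h2 : (PySem.List.pyRange (hiHead c rest l + 1) l 1).flatMap
          (fun i => (Legals rest (i + c + 1) l).map (fun e => i :: e)) = [] := by
        rw [List.flatMap_eq_nil_iff]
        intro i hi
        rw [PySem.List.mem_pyRange_one] at hi
        rw [hb i (by omega) (by omega)]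
        rfl
      rw [h2, List.append_nil]
      apply List.flatMap_congr
      intro i hi
      rw [PySem.List.mem_pyRange_one] at hi
      rw [ha i (by omega)]
    · rw [PySem.List.pyRange_one_eq_nil (show hiHead c rest l + 1 ≤ o by omega)]
      simp only [List.flatMap_nil]
      rw [List.flatMap_eq_nil_iff]
      intro i hi
      rw [PySem.List.mem_pyRange_one] at hi
      rw [hb i (by omega) (by omega)]
      rfl

theorem Legals_eq_S (rest : List Int) : ∀ (c o l : Int),
    Legals (c :: rest) o l = S (c :: rest) o l := by
  induction rest with
  | nil =>
      intro c o l
      apply cons_step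
      · intro i hi
        rw [hiHead_nil] at hi
        rw [Legals_nil, if_neg (by omega)]
        rfl
      · intro i hi hil
        rw [hiHead_nil] at hi
        rw [Legals_nil, if_pos (by omega)]
  | cons c1 rest1 ih =>
      intro c o l
      apply cons_step
      · intro i _
        exact ih c1 (i + c + 1) l
      · intro i hi hil
        rw [hiHead_cons] at hi
        rw [ih c1 (i + c + 1) l]
        exact S_eq_nil_of_gt c1 rest1 (i + c + 1) l (by omega)

-- ===== VERDICT (by name: the statement is the Claim_ definition above) =====
theorem Legals_spec : Claim_equal_Legals := by
  intro clues o l _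
  unfold Spec_Legals
  rw [Legals_alt_eq]
  cases clues with
  | nil => rw [Legals_nil]; norm_num
  | cons c rest =>
      rw [Legals_eq_S]
      split_ifs with hg
      · exact S_eq_nil_of_guard c rest o l hg
      · rfl
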